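-- pv_equiv track=rewrite | github.com/Maiiialen/Task-scheduling-algorithms | fsp.py | selectX4
-- ===== SOURCE A (Python) =====
-- import math
--
-- def calculate_Cmax(zad):
--     if len(zad) == 0:
--         return math.inf
--
--     S = []
--     C = []
--     Szad = []
--     Czad = []
--
--     Szad.append(0)
--     Czad.append(zad[0][0])
--
--     for i in range(0, len(zad)):
--         for j in range(0, len(zad[i])-1):
--             if i == 0 and j != 0:
--                 Szad.append(Czad[j-1])
--                 Czad.append(Szad[j] + zad[i][j])
--             elif i != 0:
--                 if j == 0:
--                     Szad.append(C[i-1][0])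
--                     Czad.append(Szad[0] + zad[i][0])
--                 else:
--                     Szad.append(max(Czad[j-1], C[i-1][j]))
--                     Czad.append(Szad[j] + zad[i][j])
--
--         S.append(Szad.copy())
--         C.append(Czad.copy())
--         Szad.clear()
--         Czad.clear()
--
--     return C[-1][-1]
--
-- def selectX4(zad, nieToNumer):          # Zadanie, którego usunięcie spowoduję największe zmniejszenie wartości Cmax.
--     CmaxStart = calculate_Cmax(zad)
--     index = -1
--
--     for l in range(0, len(zad)):
--         if zad[l][-1] != nieToNumer:
--             usunieteZad = zad.pop(l)
--             Cmax = calculate_Cmax(zad)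
--             zad.insert(l, usunieteZad)
--
--             if Cmax < CmaxStart:
--                 CmaxStart = Cmax
--                 index = l
--
--
--     return zad[index]
-- ===== SOURCE B (Python) =====
-- def selectX4(zad, nieToNumer):
--     # Faster exact re-implementation: prefix/suffix completion-time DP,
--     # each candidate removal's Cmax is recomputed in O(m) instead of O(n*m).
--     n = len(zad)
--     if n == 1:
--         # removing the only job leaves an empty schedule, never an improvement
--         return zad[-1]
--     M = len(zad[0]) - 1              # last column is the job number, not a time
--     times = [row[:M] for row in zad]
--
--     def cumsum(r):
--         out = []
--         c = 0
--         for p in r: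
--             c += p
--             out.append(c)
--         return out
--
--     def comp(v, r):                  # forward DP step: next completion vector
--         c = [v[0] + r[0]]
--         for j in range(1, M):
--             c.append(max(c[-1], v[j]) + r[j])
--         return c
--
--     def sufsum(r):
--         out = [0] * M
--         c = 0
--         for j in range(M - 1, -1, -1):
--             c += r[j]
--             out[j] = c
--         return out
--
--     def combine(r, w):               # backward DP step: tail-path vector
--         t = [0] * M
--         t[M - 1] = r[M - 1] + w[M - 1]
--         for j in range(M - 2, -1, -1):
--             t[j] = r[j] + max(t[j + 1], w[j])
--         return t
--
--     P = [cumsum(times[0])]           # P[i]: completion vector of jobs 0..i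
--     for i in range(1, n):
--         P.append(comp(P[i - 1], times[i]))
--     T = [None] * n                   # T[i]: tail-path vector of jobs i..n-1
--     T[n - 1] = sufsum(times[n - 1])
--     for i in range(n - 2, -1, -1):
--         T[i] = combine(times[i], T[i + 1])
--
--     best = P[n - 1][-1]              # Cmax of the full schedule
--     index = -1
--     for l in range(n):
--         if zad[l][-1] != nieToNumer:
--             if l == 0:
--                 cm = T[1][0]
--             elif l == n - 1:
--                 cm = P[n - 2][-1]
--             else:
--                 cm = max(P[l - 1][j] + T[l + 1][j] for j in range(M))
--             if cm < best:
--                 best = cm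
--                 index = l
--     return zad[index]
-- ===== Notes on version B (the rewrite author's own statement) =====
-- stated objective: faster
-- what changed: Instead of popping each job and rerunning the full O(n*m) makespan DP (A, O(n^2*m) total), B computes forward prefix completion vectors and backward tail-path vectors once and obtains the makespan after each candidate removal in O(m), O(n*m) total.
-- outside the precondition, e.g. on selectX4([[1, 2, 3, 4], [5, 6, 7], [8, 9]], 0): A returns [5, 6, 7], B raises IndexError
import Mathlib
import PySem

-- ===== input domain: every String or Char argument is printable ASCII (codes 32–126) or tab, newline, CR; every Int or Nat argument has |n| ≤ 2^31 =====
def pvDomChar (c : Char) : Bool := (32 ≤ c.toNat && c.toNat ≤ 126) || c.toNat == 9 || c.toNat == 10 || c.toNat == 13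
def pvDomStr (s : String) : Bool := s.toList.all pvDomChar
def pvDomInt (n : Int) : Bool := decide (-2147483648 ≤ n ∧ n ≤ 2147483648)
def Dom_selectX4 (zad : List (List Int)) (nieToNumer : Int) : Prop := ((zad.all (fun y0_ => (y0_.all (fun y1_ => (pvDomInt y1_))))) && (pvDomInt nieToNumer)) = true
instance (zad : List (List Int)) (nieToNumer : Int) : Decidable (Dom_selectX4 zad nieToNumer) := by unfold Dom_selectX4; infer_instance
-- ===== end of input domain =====

-- B replaces A's pop-and-recompute makespan scan (full DP per candidate) by one
-- forward-prefix / backward-tail DP pass, recomputing each removal's Cmax in O(m).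
-- A temporarily pops and re-inserts rows of zad but restores it; the equivalence is about the return value.

-- ===== PORT A =====
-- inner loop of calculate_Cmax: 'for j in range(0, len(zad[i])-1)' over state (Szad, Czad)
def pvCalcInner (C : List (List Int)) (zad : List (List Int)) (i : Int)
    (st : List Int × List Int) (j : Int) : List Int × List Int :=
  let Szad := st.1
  let Czad := st.2
  if i = 0 ∧ j ≠ 0 then
    let S' := Szad ++ [PySem.List.pyGetD Czad (j-1) 0]
    (S', Czad ++ [PySem.List.pyGetD S' j 0 + PySem.List.pyGetD (PySem.List.pyGetD zad i []) j 0])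
  else if i ≠ 0 then
    if j = 0 then
      let S' := Szad ++ [PySem.List.pyGetD (PySem.List.pyGetD C (i-1) []) 0 0]
      (S', Czad ++ [PySem.List.pyGetD S' 0 0 + PySem.List.pyGetD (PySem.List.pyGetD zad i []) 0 0])
    else
      let S' := Szad ++ [max (PySem.List.pyGetD Czad (j-1) 0) (PySem.List.pyGetD (PySem.List.pyGetD C (i-1) []) j 0)]
      (S', Czad ++ [PySem.List.pyGetD S' j 0 + PySem.List.pyGetD (PySem.List.pyGetD zad i []) j 0])
  else (Szad, Czad)

-- outer loop body: run the inner loop, then S.append(Szad.copy()); C.append(Czad.copy()); clear both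
def pvCalcOuter (zad : List (List Int))
    (st : List (List Int) × List (List Int) × List Int × List Int) (i : Int) :
    List (List Int) × List (List Int) × List Int × List Int :=
  let S := st.1
  let C := st.2.1
  let row := PySem.List.pyGetD zad i []
  let inner := (PySem.List.pyRange 0 ((row.length : Int) - 1) 1).foldl (pvCalcInner C zad i) (st.2.2.1, st.2.2.2)
  (S ++ [inner.1], C ++ [inner.2], ([] : List Int), ([] : List Int))

-- calculate_Cmax; 'none' stands for math.inf (empty schedule).  IndexError cases are excluded by Pre_.
def pvCalcCmax (zad : List (List Int)) : Option Int :=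
  if zad.length = 0 then none
  else
    let st0 : List (List Int) × List (List Int) × List Int × List Int :=
      ([], [], [(0 : Int)], [PySem.List.pyGetD (PySem.List.pyGetD zad 0 []) 0 0])
    let st := (PySem.List.pyRange 0 (zad.length : Int) 1).foldl (pvCalcOuter zad) st0
    some (PySem.List.pyGetD (PySem.List.pyGetD st.2.1 (-1) []) (-1) 0)   -- C[-1][-1]

-- 'Cmax < CmaxStart' with math.inf as none: inf < x is False, x < inf is True
def pvLtInf : Option Int → Option Int → Bool
  | some a, some b => a < b
  | some _, none   => true
  | none,   _      => false

-- loop body of selectX4: pop row l, recompute Cmax, re-insert (modelled immutably: zad is restored)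
def pvSelStepA (zad : List (List Int)) (nieToNumer : Int)
    (st : Option Int × Int) (l : Int) : Option Int × Int :=
  if PySem.List.pyGetD (PySem.List.pyGetD zad l []) (-1) 0 ≠ nieToNumer then
    match PySem.List.pop? zad l with
    | some r =>
        let Cmax := pvCalcCmax r.2
        if pvLtInf Cmax st.1 then (Cmax, l) else st
    | none => st
  else st

def selectX4 (zad : List (List Int)) (nieToNumer : Int) : List Int :=
  let st := (PySem.List.pyRange 0 (zad.length : Int) 1).foldl (pvSelStepA zad nieToNumer)
      (pvCalcCmax zad, (-1 : Int))
  PySem.List.pyGetD zad st.2 []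

-- ===== PORT B =====
def pvCumAux (c : Int) : List Int → List Int
  | [] => []
  | p :: ps => (c + p) :: pvCumAux (c + p) ps

def pvCumsum (r : List Int) : List Int := pvCumAux 0 r

-- forward DP step (comp in Source B), as the obvious carry recursion
def pvCompAux (c : Int) : List Int → List Int → List Int
  | v :: vs, p :: ps => (max c v + p) :: pvCompAux (max c v + p) vs ps
  | _, _ => []

def pvComp (v r : List Int) : List Int :=
  match v, r with
  | v0 :: vs, p0 :: ps => (v0 + p0) :: pvCompAux (v0 + p0) vs ps
  | _, _ => []

-- suffix sums (sufsum in Source B)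
def pvSufsum : List Int → List Int
  | [] => []
  | [p] => [p]
  | p :: q :: rest =>
    let s := pvSufsum (q :: rest)
    (p + s.headD 0) :: s

-- backward DP step (combine in Source B)
def pvCombine : List Int → List Int → List Int
  | [p], [w] => [p + w]
  | p :: ps, w :: ws =>
    let t := pvCombine ps ws
    (p + max (t.headD 0) w) :: t
  | _, _ => []

-- P[1:], built front to back
def pvPrefixes (v : List Int) : List (List Int) → List (List Int)
  | [] => []
  | r :: rest =>
    let v' := pvComp v r
    v' :: pvPrefixes v' rest

-- T, built back to front
def pvTails : List (List Int) → List (List Int)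
  | [] => []
  | [r] => [pvSufsum r]
  | r :: q :: rest =>
    let ts := pvTails (q :: rest)
    pvCombine r (ts.headD []) :: ts

-- max(P[l-1][j] + T[l+1][j] for j in range(M))
def pvMaxZip : List Int → List Int → Int
  | [a], [b] => a + b
  | a :: as_, b :: bs => max (a + b) (pvMaxZip as_ bs)
  | _, _ => 0

def pvSelStepB (zad P T : List (List Int)) (n : Nat) (nieToNumer : Int)
    (st : Int × Int) (l : Nat) : Int × Int :=
  if PySem.List.pyGetD (zad.getD l []) (-1) 0 ≠ nieToNumer then
    let cm :=
      if l = 0 then (T.getD 1 []).headD 0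
      else if l = n - 1 then (P.getD (n - 2) []).getLastD 0
      else pvMaxZip (P.getD (l - 1) []) (T.getD (l + 1) [])
    if cm < st.1 then (cm, (l : Int)) else st
  else st

def selectX4_alt (zad : List (List Int)) (nieToNumer : Int) : List Int :=
  match zad with
  | [] => []   -- Source B raises IndexError on []; excluded by Pre_
  | r0 :: rest =>
    let n := (r0 :: rest).length
    if n = 1 then PySem.List.pyGetD (r0 :: rest) (-1) []
    else
      let M := r0.length - 1        -- last column is the job number
      let t0 := r0.take M
      let trest := rest.map (fun r => r.take M)
      let P := pvCumsum t0 :: pvPrefixes (pvCumsum t0) trest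
      let T := pvTails (t0 :: trest)
      let best := (P.getD (n - 1) []).getLastD 0
      let st := (List.range n).foldl (pvSelStepB (r0 :: rest) P T n nieToNumer) (best, (-1 : Int))
      PySem.List.pyGetD (r0 :: rest) st.2 []

-- ===== PRECONDITION & SPEC =====
-- Pre_ restricts to nonempty rectangular instances (all rows the same length, ≥ 2 columns
-- when there are ≥ 2 jobs, ≥ 1 column for a single job).  This excludes the inputs where A
-- raises IndexError ([], a too-short first row, most ragged shapes) and also some ragged
-- inputs with shrinking row lengths on which A still returns by silently truncating rows
-- (see cites); B assumes the rectangular jobs×(machines+number) format.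
def Pre_selectX4 (zad : List (List Int)) (nieToNumer : Int) : Prop :=
  zad ≠ [] ∧ (∀ r ∈ zad, r.length = (zad.headD []).length) ∧
    1 ≤ (zad.headD []).length ∧ (2 ≤ (zad.headD []).length ∨ zad.length = 1)

instance (zad : List (List Int)) (nieToNumer : Int) : Decidable (Pre_selectX4 zad nieToNumer) := by
  unfold Pre_selectX4; infer_instance

def pvWitness_selectX4 : List (List Int) × Int := ([[2, 1, 1], [1, 3, 2], [2, 2, 3]], 3)

def Spec_selectX4 (zad : List (List Int)) (nieToNumer : Int) (out : List Int) : Prop := out = selectX4_alt zad nieToNumer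
instance (zad : List (List Int)) (nieToNumer : Int) (out : List Int) : Decidable (Spec_selectX4 zad nieToNumer out) := by unfold Spec_selectX4; infer_instance

-- ===== CLAIM (what is proved, stated in full; the proofs are below) =====
def Claim_equal_selectX4 : Prop := ∀ (zad : List (List Int)) (nieToNumer : Int), Dom_selectX4 zad nieToNumer → Pre_selectX4 zad nieToNumer → Spec_selectX4 zad nieToNumer (selectX4 zad nieToNumer)

-- ===== LEMMAS AND PROOFS =====

-- clean tail-vector of a block of rows (proof layer)
def pvTailVec : List (List Int) → List Int
  | [] => []
  | [r] => pvSufsum r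
  | r :: q :: rest => pvCombine r (pvTailVec (q :: rest))

-- Cmax of a nonempty times matrix, as B computes it
def pvCmaxRows : List (List Int) → Int
  | [] => 0
  | r :: rest => ((rest.foldl pvComp (pvCumsum r)).getLastD 0)

-- ---- lengths ----
theorem pvLenCompAux : ∀ (vs rs : List Int) (c : Int),
    (pvCompAux c vs rs).length = min vs.length rs.length := by
  intro vs
  induction vs with
  | nil => intro rs c; cases rs <;> simp [pvCompAux]
  | cons v vs ih => intro rs c; cases rs <;> simp [pvCompAux, ih]

theorem pvLenComp (v r : List Int) (h : v.length = r.length) :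
    (pvComp v r).length = v.length := by
  cases v with
  | nil => cases r <;> simp_all [pvComp]
  | cons v0 vs => cases r with
    | nil => simp_all
    | cons r0 rs => simp [pvComp, pvLenCompAux]; simp at h; omega

theorem pvLenCumAux : ∀ (ps : List Int) (c : Int), (pvCumAux c ps).length = ps.length := by
  intro ps; induction ps with
  | nil => intro c; simp [pvCumAux]
  | cons p ps ih => intro c; simp [pvCumAux, ih]

theorem pvLenCumsum (r : List Int) : (pvCumsum r).length = r.length := pvLenCumAux r 0

theorem pvLenSufsum : ∀ (r : List Int), (pvSufsum r).length = r.length := by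
  intro r
  induction r with
  | nil => simp [pvSufsum]
  | cons p ps ih => cases ps <;> simp_all [pvSufsum]

theorem pvLenCombine : ∀ (r w : List Int), r.length = w.length →
    (pvCombine r w).length = r.length := by
  intro r
  induction r with
  | nil => intro w h; cases w <;> simp_all [pvCombine]
  | cons p ps ih =>
    intro w h
    cases w with
    | nil => simp_all
    | cons w0 ws =>
      cases ps with
      | nil => cases ws <;> simp_all [pvCombine]
      | cons p2 ps' =>
        cases ws with
        | nil => simp_all
        | cons w2 ws' => simp_all [pvCombine]

theorem pvLenFoldlComp : ∀ (rows : List (List Int)) (v : List Int),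
    (∀ r ∈ rows, r.length = v.length) → (rows.foldl pvComp v).length = v.length := by
  intro rows
  induction rows with
  | nil => intro v _; simp
  | cons r rest ih =>
    intro v h
    have h1 : r.length = v.length := h r (by simp)
    have h2 := pvLenComp v r h1.symm
    simp only [List.foldl_cons]
    rw [ih (pvComp v r) (by intro x hx; rw [h2]; exact h x (by simp [hx]))]
    exact h2

-- ---- cons normal forms ----
theorem pvMaxZipCons (a b : Int) (as_ bs : List Int) (h : as_ ≠ []) (h2 : bs ≠ []) :
    pvMaxZip (a :: as_) (b :: bs) = max (a + b) (pvMaxZip as_ bs) := by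
  cases as_ with
  | nil => simp at h
  | cons x xs => cases bs with
    | nil => simp at h2
    | cons y ys => simp [pvMaxZip]

theorem pvSufsumCons (p : Int) (ps : List Int) (h : ps ≠ []) :
    pvSufsum (p :: ps) = (p + (pvSufsum ps).headD 0) :: pvSufsum ps := by
  cases ps with
  | nil => simp at h
  | cons q rest => simp [pvSufsum]

theorem pvCombineCons (p w : Int) (ps ws : List Int) (hp : ps ≠ []) (hw : ws ≠ []) :
    pvCombine (p :: ps) (w :: ws)
      = (p + max ((pvCombine ps ws).headD 0) w) :: pvCombine ps ws := by
  cases ps with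
  | nil => simp at hp
  | cons p2 ps' => cases ws with
    | nil => simp at hw
    | cons w2 ws' => simp [pvCombine]

theorem pvTailVecCons (r : List Int) (rows : List (List Int)) (h : rows ≠ []) :
    pvTailVec (r :: rows) = pvCombine r (pvTailVec rows) := by
  cases rows with
  | nil => simp at h
  | cons q rest => simp [pvTailVec]

theorem pvLenTailVec : ∀ (rows : List (List Int)) (M : Nat), rows ≠ [] →
    (∀ r ∈ rows, r.length = M) → (pvTailVec rows).length = M := by
  intro rows
  induction rows with
  | nil => intro M h; simp at h
  | cons r rest ih =>
    intro M _ hl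
    cases rest with
    | nil => simp [pvTailVec, pvLenSufsum]; exact hl r (by simp)
    | cons q rest' =>
      rw [pvTailVecCons r _ (by simp)]
      have ht := ih M (by simp) (by intro x hx; exact hl x (List.mem_cons_of_mem _ hx))
      rw [pvLenCombine _ _ (by rw [ht]; exact hl r (by simp))]
      exact hl r (by simp)

theorem pvSufsumNeNil (r : List Int) (h : r ≠ []) : pvSufsum r ≠ [] := by
  have := pvLenSufsum r
  intro hc; rw [hc] at this; simp at this; exact h (List.eq_nil_of_length_eq_zero this.symm)

-- ---- sums ----
theorem pvHeadDSufsum : ∀ (r : List Int), r ≠ [] → (pvSufsum r).headD 0 = r.sum := by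
  intro r
  induction r with
  | nil => intro h; simp at h
  | cons p ps ih =>
    intro _
    cases ps with
    | nil => simp [pvSufsum]
    | cons q rest =>
      rw [pvSufsumCons p _ (by simp), ih (by simp)]
      simp

theorem pvGetLastDCumAux : ∀ (ps : List Int) (c d : Int),
    (c :: pvCumAux c ps).getLastD d = c + ps.sum := by
  intro ps
  induction ps with
  | nil => intro c d; simp [pvCumAux]
  | cons p ps ih => intro c d; simp only [pvCumAux, List.getLastD_cons, ih]; simp; ring

-- ---- the exchange lemma: pushing one forward-DP step through the max-zip ----
theorem pvMaxZipCompAux : ∀ (vs rs ws : List Int) (c : Int), vs ≠ [] →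
    vs.length = rs.length → vs.length = ws.length →
    pvMaxZip (pvCompAux c vs rs) ws
      = max (c + (pvCombine rs ws).headD 0) (pvMaxZip vs (pvCombine rs ws)) := by
  intro vs
  induction vs with
  | nil => intro rs ws c h; simp at h
  | cons v vs' ih =>
    intro rs ws c _ h1 h2
    cases rs with
    | nil => simp at h1
    | cons r rs' =>
      cases ws with
      | nil => simp at h2
      | cons w ws' =>
        simp only [List.length_cons, Nat.add_right_cancel_iff] at h1 h2
        cases vs' with
        | nil =>
          have hr : rs' = [] := List.eq_nil_of_length_eq_zero h1.symm
          have hw : ws' = [] := List.eq_nil_of_length_eq_zero h2.symm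
          subst hr; subst hw
          simp [pvCompAux, pvMaxZip, pvCombine]; omega
        | cons v2 vs'' =>
          have hrne : rs' ≠ [] := by intro hc; rw [hc] at h1; simp at h1
          have hwne : ws' ≠ [] := by intro hc; rw [hc] at h2; simp at h2
          have hcombne : pvCombine rs' ws' ≠ [] := by
            intro hc
            have := pvLenCombine rs' ws' (by omega)
            rw [hc] at this; simp at this; exact hrne (List.eq_nil_of_length_eq_zero this.symm)
          have hcaux : pvCompAux (max c v + r) (v2 :: vs'') rs' ≠ [] := by
            intro hc
            have hlen := pvLenCompAux (v2 :: vs'') rs' (max c v + r)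
            rw [hc] at hlen
            simp only [List.length_nil, List.length_cons] at hlen h1
            omega
          rw [show pvCompAux c (v :: v2 :: vs'') (r :: rs')
                = (max c v + r) :: pvCompAux (max c v + r) (v2 :: vs'') rs' from rfl]
          rw [pvMaxZipCons _ _ _ _ hcaux hwne]
          rw [ih rs' ws' (max c v + r) (by simp) h1 h2]
          rw [pvCombineCons _ _ _ _ hrne hwne]
          rw [pvMaxZipCons _ _ _ _ (by simp) hcombne]
          simp only [List.headD_cons]
          omega

theorem pvMaxZipComp (v r w : List Int) (hv : v ≠ [])
    (h1 : v.length = r.length) (h2 : v.length = w.length) :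
    pvMaxZip (pvComp v r) w = pvMaxZip v (pvCombine r w) := by
  cases v with
  | nil => simp at hv
  | cons v0 vs =>
    cases r with
    | nil => simp at h1
    | cons r0 rs =>
      cases w with
      | nil => simp at h2
      | cons w0 ws =>
        simp only [List.length_cons, Nat.add_right_cancel_iff] at h1 h2
        cases vs with
        | nil =>
          have hr : rs = [] := List.eq_nil_of_length_eq_zero h1.symm
          have hw : ws = [] := List.eq_nil_of_length_eq_zero h2.symm
          subst hr; subst hw
          simp [pvComp, pvCompAux, pvMaxZip, pvCombine]; ring
        | cons v2 vs' =>
          have hrne : rs ≠ [] := by intro hc; rw [hc] at h1; simp at h1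
          have hwne : ws ≠ [] := by intro hc; rw [hc] at h2; simp at h2
          have hcombne : pvCombine rs ws ≠ [] := by
            intro hc
            have := pvLenCombine rs ws (by omega)
            rw [hc] at this; simp at this; exact hrne (List.eq_nil_of_length_eq_zero this.symm)
          have hcaux : pvCompAux (v0 + r0) (v2 :: vs') rs ≠ [] := by
            intro hc
            have hlen := pvLenCompAux (v2 :: vs') rs (v0 + r0)
            rw [hc] at hlen
            simp only [List.length_nil, List.length_cons] at hlen h1
            omega
          rw [show pvComp (v0 :: v2 :: vs') (r0 :: rs)
                = (v0 + r0) :: pvCompAux (v0 + r0) (v2 :: vs') rs from rfl]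
          rw [pvMaxZipCons _ _ _ _ hcaux hwne]
          rw [pvMaxZipCompAux (v2 :: vs') rs ws (v0 + r0) (by simp) h1 h2]
          rw [pvCombineCons _ _ _ _ hrne hwne]
          rw [pvMaxZipCons _ _ _ _ (by simp) hcombne]
          omega

-- ---- last element of one forward-DP step ----
theorem pvGetLastDCompAux : ∀ (vs rs : List Int) (c : Int), vs ≠ [] → vs.length = rs.length →
    (c :: pvCompAux c vs rs).getLastD 0
      = max (c + rs.sum) (pvMaxZip vs (pvSufsum rs)) := by
  intro vs
  induction vs with
  | nil => intro rs c h; simp at h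
  | cons v vs' ih =>
    intro rs c _ h1
    cases rs with
    | nil => simp at h1
    | cons r rs' =>
      simp only [List.length_cons, Nat.add_right_cancel_iff] at h1
      cases vs' with
      | nil =>
        have hr : rs' = [] := List.eq_nil_of_length_eq_zero h1.symm
        subst hr
        simp [pvCompAux, pvMaxZip, pvSufsum]
      | cons v2 vs'' =>
        have hrne : rs' ≠ [] := by intro hc; rw [hc] at h1; simp at h1
        rw [show pvCompAux c (v :: v2 :: vs'') (r :: rs')
              = (max c v + r) :: pvCompAux (max c v + r) (v2 :: vs'') rs' from rfl]
        rw [List.getLastD_cons, List.getLastD_cons]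
        have := ih rs' (max c v + r) (by simp) h1
        rw [List.getLastD_cons] at this
        rw [this]
        rw [pvSufsumCons _ _ hrne, pvHeadDSufsum _ hrne]
        rw [pvMaxZipCons _ _ _ _ (by simp) (pvSufsumNeNil _ hrne)]
        simp only [List.sum_cons]
        omega

-- ---- the crossing identity: Cmax from an initial vector = max-zip with the tail vectors ----
theorem pvCrossing : ∀ (rows : List (List Int)) (v : List Int), rows ≠ [] → v ≠ [] →
    (∀ r ∈ rows, r.length = v.length) →
    (rows.foldl pvComp v).getLastD 0 = pvMaxZip v (pvTailVec rows) := by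
  intro rows
  induction rows with
  | nil => intro v h; simp at h
  | cons r rest ih =>
    intro v _ hv hl
    have hrv : r.length = v.length := hl r (by simp)
    cases rest with
    | nil =>
      simp only [List.foldl_cons, List.foldl_nil, pvTailVec]
      cases v with
      | nil => simp at hv
      | cons v0 vs =>
        cases r with
        | nil => simp at hrv
        | cons r0 rs =>
          simp only [List.length_cons, Nat.add_right_cancel_iff] at hrv
          rw [show pvComp (v0 :: vs) (r0 :: rs) = (v0 + r0) :: pvCompAux (v0 + r0) vs rs from rfl]
          cases vs with
          | nil =>
            have : rs = [] := List.eq_nil_of_length_eq_zero hrv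
            subst this
            simp [pvCompAux, pvSufsum, pvMaxZip]
          | cons v2 vs' =>
            have hrsne : rs ≠ [] := by intro hc; rw [hc] at hrv; simp at hrv
            rw [pvGetLastDCompAux _ _ _ (by simp) (by simpa using hrv.symm)]
            rw [pvSufsumCons _ _ hrsne, pvHeadDSufsum _ hrsne]
            rw [pvMaxZipCons _ _ _ _ (by simp) (pvSufsumNeNil _ hrsne)]
            omega
    | cons q rest' =>
      have hcomp_len : (pvComp v r).length = v.length := pvLenComp v r hrv.symm
      have hcompne : pvComp v r ≠ [] := by
        intro hc; rw [hc] at hcomp_len; simp at hcomp_len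
        exact hv (List.eq_nil_of_length_eq_zero hcomp_len.symm)
      rw [List.foldl_cons]
      rw [ih (pvComp v r) (by simp) hcompne
            (by intro x hx; rw [hcomp_len]; exact hl x (List.mem_cons_of_mem _ hx))]
      have htvne : q :: rest' ≠ [] := by simp
      have htvlen : (pvTailVec (q :: rest')).length = v.length :=
        pvLenTailVec _ _ htvne (by intro x hx; exact hl x (List.mem_cons_of_mem _ hx))
      rw [pvMaxZipComp v r (pvTailVec (q :: rest')) hv hrv.symm htvlen.symm]
      rw [pvTailVecCons r _ (by simp)]

-- ---- cumsum versions ----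
theorem pvMaxZipCumAux : ∀ (ps ws : List Int) (c : Int), ps ≠ [] → ps.length = ws.length →
    pvMaxZip (pvCumAux c ps) ws = c + (pvCombine ps ws).headD 0 := by
  intro ps
  induction ps with
  | nil => intro ws c h; simp at h
  | cons p ps' ih =>
    intro ws c _ h1
    cases ws with
    | nil => simp at h1
    | cons w ws' =>
      simp only [List.length_cons, Nat.add_right_cancel_iff] at h1
      cases ps' with
      | nil =>
        have : ws' = [] := List.eq_nil_of_length_eq_zero h1.symm
        subst this
        simp [pvCumAux, pvMaxZip, pvCombine]; ring
      | cons p2 ps'' =>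
        have hwne : ws' ≠ [] := by intro hc; rw [hc] at h1; simp at h1
        have hcumne : pvCumAux (c + p) (p2 :: ps'') ≠ [] := by
          intro hc; have := pvLenCumAux (p2 :: ps'') (c + p); rw [hc] at this; simp at this
        rw [show pvCumAux c (p :: p2 :: ps'') = (c + p) :: pvCumAux (c + p) (p2 :: ps'') from rfl]
        rw [pvMaxZipCons _ _ _ _ hcumne hwne]
        rw [ih ws' (c + p) (by simp) h1]
        rw [pvCombineCons _ _ _ _ (by simp) hwne]
        simp only [List.headD_cons]
        omega

theorem pvMaxZipCumsum (r w : List Int) (h : r ≠ []) (hl : r.length = w.length) :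
    pvMaxZip (pvCumsum r) w = (pvCombine r w).headD 0 := by
  rw [pvCumsum, pvMaxZipCumAux r w 0 h hl]; omega

-- ---- Cmax of a block = head of its tail vector ----
theorem pvCmaxRowsHead : ∀ (rows : List (List Int)) (M : Nat), rows ≠ [] → 1 ≤ M →
    (∀ r ∈ rows, r.length = M) → pvCmaxRows rows = (pvTailVec rows).headD 0 := by
  intro rows
  induction rows with
  | nil => intro M h; simp at h
  | cons r rest ih =>
    intro M _ hM hl
    have hrM : r.length = M := hl r (by simp)
    have hrne : r ≠ [] := by intro hc; rw [hc] at hrM; simp at hrM; omega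
    cases rest with
    | nil =>
      simp only [pvCmaxRows, List.foldl_nil, pvTailVec]
      rw [show pvCumsum r = pvCumAux 0 r from rfl]
      cases r with
      | nil => simp at hrne
      | cons p ps =>
        rw [show pvCumAux 0 (p :: ps) = (0 + p) :: pvCumAux (0 + p) ps from rfl]
        rw [pvGetLastDCumAux]
        rw [pvHeadDSufsum _ (by simp)]
        simp
    | cons q rest' =>
      have hcumne : pvCumsum r ≠ [] := by
        intro hc; have := pvLenCumsum r; rw [hc] at this; simp at this
        exact hrne (List.eq_nil_of_length_eq_zero this.symm)
      simp only [pvCmaxRows]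
      rw [pvCrossing (q :: rest') (pvCumsum r) (by simp) hcumne
            (by intro x hx; rw [pvLenCumsum, hrM]; exact hl x (List.mem_cons_of_mem _ hx))]
      have htvlen : (pvTailVec (q :: rest')).length = M :=
        pvLenTailVec _ _ (by simp) (by intro x hx; exact hl x (List.mem_cons_of_mem _ hx))
      rw [pvMaxZipCumsum r _ hrne (by rw [hrM, htvlen])]
      rw [pvTailVecCons r _ (by simp)]

-- ---- small getD helpers ----
theorem pvGetDTake {α : Type} [Inhabited α] (W : List α) (k j : Nat) (d : α) (h : j < k) :
    (W.take k).getD j d = W.getD j d := by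
  simp only [List.getD_eq_getElem?_getD]
  rw [List.getElem?_take_of_lt h]

theorem pvGetDAppendLen {α : Type} (S : List α) (x : α) (d : α) :
    (S ++ [x]).getD S.length d = x := by
  simp only [List.getD_eq_getElem?_getD]
  rw [List.getElem?_append_right (Nat.le_refl _)]
  simp

theorem pvTakeSucc {α : Type} (W : List α) (k : Nat) (d : α) (h : k < W.length) :
    W.take (k+1) = W.take k ++ [W.getD k d] := by
  rw [List.take_add_one]
  congr 1
  rw [List.getElem?_eq_getElem h]
  simp [List.getD_eq_getElem?_getD, List.getElem?_eq_getElem h]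

theorem pvGetDSingleton {α : Type} (x d : α) : ([x].getD 0 d) = x := rfl

-- ---- prefix-list characterization ----
theorem pvLenPrefixes : ∀ (rows : List (List Int)) (v : List Int),
    (pvPrefixes v rows).length = rows.length := by
  intro rows
  induction rows with
  | nil => intro v; simp [pvPrefixes]
  | cons r rest ih => intro v; simp [pvPrefixes, ih]

theorem pvPrefixesGetD : ∀ (rows : List (List Int)) (v : List Int) (k : Nat),
    k ≤ rows.length →
    (v :: pvPrefixes v rows).getD k [] = (rows.take k).foldl pvComp v := by
  intro rows
  induction rows with
  | nil =>
    intro v k hk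
    have : k = 0 := by simpa using hk
    subst this; simp
  | cons r rest ih =>
    intro v k hk
    cases k with
    | zero => simp
    | succ k' =>
      simp only [pvPrefixes, List.getD_cons_succ, List.take_succ_cons, List.foldl_cons]
      exact ih (pvComp v r) k' (by simpa using hk)

-- ---- tail-list characterization ----
theorem pvTailsHeadD : ∀ (rows : List (List Int)), rows ≠ [] →
    (pvTails rows).headD [] = pvTailVec rows := by
  intro rows
  induction rows with
  | nil => intro h; simp at h
  | cons r rest ih =>
    intro _
    cases rest with
    | nil => simp [pvTails, pvTailVec]
    | cons q rest' =>
      simp only [pvTails, List.headD_cons]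
      rw [ih (by simp), pvTailVecCons r _ (by simp)]

theorem pvTailsGetD : ∀ (rows : List (List Int)) (k : Nat), k < rows.length →
    (pvTails rows).getD k [] = pvTailVec (rows.drop k) := by
  intro rows
  induction rows with
  | nil => intro k hk; simp at hk
  | cons r rest ih =>
    intro k hk
    cases rest with
    | nil =>
      have : k = 0 := by simpa using hk
      subst this
      simp [pvTails, pvTailVec]
    | cons q rest' =>
      cases k with
      | zero =>
        simp only [pvTails, List.getD_cons_zero, List.drop_zero]
        rw [pvTailsHeadD _ (by simp), pvTailVecCons r _ (by simp)]
      | succ k' =>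
        simp only [pvTails, List.getD_cons_succ, List.drop_succ_cons]
        exact ih k' (by simpa using hk)

-- ---- index recurrences for the forward DP ----
theorem pvCompAuxGetD : ∀ (vs rs : List Int) (c : Int) (k : Nat),
    k < vs.length → vs.length = rs.length →
    (c :: pvCompAux c vs rs).getD (k+1) 0
      = max ((c :: pvCompAux c vs rs).getD k 0) (vs.getD k 0) + rs.getD k 0 := by
  intro vs
  induction vs with
  | nil => intro rs c k hk; simp at hk
  | cons v vs' ih =>
    intro rs c k hk h1
    cases rs with
    | nil => simp at h1
    | cons r rs' =>
      simp only [List.length_cons, Nat.add_right_cancel_iff] at h1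
      rw [show pvCompAux c (v :: vs') (r :: rs') = (max c v + r) :: pvCompAux (max c v + r) vs' rs' from rfl]
      cases k with
      | zero => simp
      | succ k' =>
        simp only [List.getD_cons_succ]
        exact ih rs' (max c v + r) k' (by simpa using hk) h1

theorem pvCompGetDZero (v t : List Int) (hv : v ≠ []) (ht : t ≠ []) :
    (pvComp v t).getD 0 0 = v.getD 0 0 + t.getD 0 0 := by
  cases v with
  | nil => simp at hv
  | cons v0 vs => cases t with
    | nil => simp at ht
    | cons t0 ts => simp [pvComp]

theorem pvCompGetDSucc (v t : List Int) (k : Nat) (hk : k + 1 < v.length)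
    (h : v.length = t.length) :
    (pvComp v t).getD (k+1) 0
      = max ((pvComp v t).getD k 0) (v.getD (k+1) 0) + t.getD (k+1) 0 := by
  cases v with
  | nil => simp at hk
  | cons v0 vs =>
    cases t with
    | nil => simp at h
    | cons t0 ts =>
      simp only [List.length_cons, Nat.add_right_cancel_iff] at h
      rw [show pvComp (v0 :: vs) (t0 :: ts) = (v0 + t0) :: pvCompAux (v0 + t0) vs ts from rfl]
      rw [pvCompAuxGetD vs ts (v0 + t0) k (by simpa using hk) h]
      simp

-- ---- index recurrences for cumulative sums ----
theorem pvCumAuxGetD : ∀ (ps : List Int) (c : Int) (k : Nat), k + 1 < ps.length →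
    (pvCumAux c ps).getD (k+1) 0 = (pvCumAux c ps).getD k 0 + ps.getD (k+1) 0 := by
  intro ps
  induction ps with
  | nil => intro c k hk; simp at hk
  | cons p ps' ih =>
    intro c k hk
    rw [show pvCumAux c (p :: ps') = (c + p) :: pvCumAux (c + p) ps' from rfl]
    cases k with
    | zero =>
      cases ps' with
      | nil => simp at hk
      | cons q ps'' => simp [pvCumAux]
    | succ k' =>
      simp only [List.getD_cons_succ]
      exact ih (c + p) k' (by simpa using hk)

theorem pvCumsumGetDZero (r : List Int) (h : r ≠ []) : (pvCumsum r).getD 0 0 = r.getD 0 0 := by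
  cases r with
  | nil => simp at h
  | cons p ps => simp [pvCumsum, pvCumAux]

theorem pvCumsumGetDSucc (r : List Int) (k : Nat) (h : k + 1 < r.length) :
    (pvCumsum r).getD (k+1) 0 = (pvCumsum r).getD k 0 + r.getD (k+1) 0 :=
  pvCumAuxGetD r 0 k h

-- ---- branch lemmas for the inner loop body ----
theorem pvCalcInnerRow0Zero (C zad : List (List Int)) (st : List Int × List Int) :
    pvCalcInner C zad 0 st 0 = (st.1, st.2) := by
  simp [pvCalcInner]

theorem pvCalcInnerRow0Pos (C zad : List (List Int)) (st : List Int × List Int)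
    (j : Int) (hj : j ≠ 0) :
    pvCalcInner C zad 0 st j
      = (st.1 ++ [PySem.List.pyGetD st.2 (j-1) 0],
         st.2 ++ [PySem.List.pyGetD (st.1 ++ [PySem.List.pyGetD st.2 (j-1) 0]) j 0
           + PySem.List.pyGetD (PySem.List.pyGetD zad 0 []) j 0]) := by
  simp [pvCalcInner, hj]

theorem pvCalcInnerRowiZero (C zad : List (List Int)) (i : Int) (st : List Int × List Int)
    (hi : i ≠ 0) :
    pvCalcInner C zad i st 0
      = (st.1 ++ [PySem.List.pyGetD (PySem.List.pyGetD C (i-1) []) 0 0],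
         st.2 ++ [PySem.List.pyGetD (st.1 ++ [PySem.List.pyGetD (PySem.List.pyGetD C (i-1) []) 0 0]) 0 0
           + PySem.List.pyGetD (PySem.List.pyGetD zad i []) 0 0]) := by
  simp [pvCalcInner, hi]

theorem pvCalcInnerRowiPos (C zad : List (List Int)) (i : Int) (st : List Int × List Int)
    (j : Int) (hi : i ≠ 0) (hj : j ≠ 0) :
    pvCalcInner C zad i st j
      = (st.1 ++ [max (PySem.List.pyGetD st.2 (j-1) 0) (PySem.List.pyGetD (PySem.List.pyGetD C (i-1) []) j 0)],
         st.2 ++ [PySem.List.pyGetD (st.1 ++ [max (PySem.List.pyGetD st.2 (j-1) 0) (PySem.List.pyGetD (PySem.List.pyGetD C (i-1) []) j 0)]) j 0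
           + PySem.List.pyGetD (PySem.List.pyGetD zad i []) j 0]) := by
  simp [pvCalcInner, hi, hj]

-- ---- inner loop of calculate_Cmax, row 0: builds the cumulative sums ----
theorem pvIL0 (C : List (List Int)) (zad : List (List Int)) (row0 : List Int) (m : Nat)
    (hrow : PySem.List.pyGetD zad 0 [] = row0) (hm : row0.length = m) (h2 : 2 ≤ m) :
    ∀ (k : Nat), 1 ≤ k → k ≤ m - 1 →
    ∃ S : List Int, S.length = k ∧
      (PySem.List.pyRange 0 (k : Int) 1).foldl (pvCalcInner C zad 0)
          ([0], [PySem.List.pyGetD (PySem.List.pyGetD zad 0 []) 0 0])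
        = (S, (pvCumsum (row0.take (m-1))).take k) := by
  have ht0len : (row0.take (m-1)).length = m - 1 := by simp [hm]
  have ht0ne : row0.take (m-1) ≠ [] := by
    intro hc; rw [hc] at ht0len; simp at ht0len; omega
  have hWlen : (pvCumsum (row0.take (m-1))).length = m - 1 := by
    rw [pvLenCumsum]; exact ht0len
  intro k hk1
  induction k, hk1 using Nat.le_induction with
  | base =>
    intro _
    refine ⟨[0], by simp, ?_⟩
    rw [show ((1:Nat) : Int) = 0 + 1 from by omega, PySem.List.pyRange_one_singleton]
    simp only [List.foldl_cons, List.foldl_nil]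
    rw [pvCalcInnerRow0Zero]
    rw [hrow, PySem.List.pyGetD_zero]
    rw [pvTakeSucc _ 0 0 (by omega)]
    rw [pvCumsumGetDZero _ ht0ne]
    rw [pvGetDTake _ (m-1) 0 0 (by omega)]
    simp
  | succ k hk ih =>
    intro hkm
    obtain ⟨S, hSlen, hfold⟩ := ih (by omega)
    set W := pvCumsum (row0.take (m-1)) with hW
    rw [show (((k+1:Nat)) : Int) = (k : Int) + 1 from by push_cast; ring]
    rw [PySem.List.pyRange_one_succ_right (by positivity)]
    rw [List.foldl_append, hfold]
    simp only [List.foldl_cons, List.foldl_nil]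
    rw [pvCalcInnerRow0Pos C zad (S, W.take k) (k:Int) (by omega)]
    have hcast1 : ((k:Int) - 1) = ((k - 1 : Nat) : Int) := by omega
    simp only [hcast1, PySem.List.pyGetD_natCast, hrow]
    rw [pvGetDTake _ k (k-1) 0 (by omega)]
    refine ⟨S ++ [W.getD (k-1) 0], by simp [hSlen], ?_⟩
    rw [show (S ++ [W.getD (k-1) 0]).getD k 0 = W.getD (k-1) 0 from by
      rw [← hSlen]; exact pvGetDAppendLen S _ 0]
    rw [pvTakeSucc W k 0 (by omega)]
    have hval : W.getD k 0 = W.getD (k-1) 0 + row0.getD k 0 := by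
      have hksucc : (k - 1) + 1 = k := by omega
      have hrec := pvCumsumGetDSucc (row0.take (m-1)) (k-1) (by omega)
      rw [hksucc, ← hW] at hrec
      rw [hrec]
      rw [show (row0.take (m-1)).getD k 0 = row0.getD k 0 from
        pvGetDTake row0 (m-1) k 0 (by omega)]
    rw [hval]

-- ---- inner loop of calculate_Cmax, row i ≥ 1: builds one forward-DP step ----
theorem pvILi (C : List (List Int)) (zad : List (List Int)) (i : Int) (hi : 1 ≤ i)
    (V row : List Int) (m : Nat)
    (hV : PySem.List.pyGetD C (i-1) [] = V) (hVlen : V.length = m - 1)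
    (hrow : PySem.List.pyGetD zad i [] = row) (hm : row.length = m) (h2 : 2 ≤ m) :
    ∀ (k : Nat), 1 ≤ k → k ≤ m - 1 →
    ∃ S : List Int, S.length = k ∧
      (PySem.List.pyRange 0 (k : Int) 1).foldl (pvCalcInner C zad i) ([], [])
        = (S, (pvComp V (row.take (m-1))).take k) := by
  have htlen : (row.take (m-1)).length = m - 1 := by simp [hm]
  have htne : row.take (m-1) ≠ [] := by
    intro hc; rw [hc] at htlen; simp at htlen; omega
  have hVne : V ≠ [] := by
    intro hc; rw [hc] at hVlen; simp at hVlen; omega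
  have hWlen : (pvComp V (row.take (m-1))).length = m - 1 := by
    rw [pvLenComp _ _ (by rw [hVlen, htlen])]; exact hVlen
  have hine : i ≠ 0 := by omega
  intro k hk1
  induction k, hk1 using Nat.le_induction with
  | base =>
    intro _
    set W := pvComp V (row.take (m-1)) with hWdef
    refine ⟨[V.getD 0 0], by simp, ?_⟩
    rw [show ((1:Nat) : Int) = 0 + 1 from by omega, PySem.List.pyRange_one_singleton]
    simp only [List.foldl_cons, List.foldl_nil]
    rw [pvCalcInnerRowiZero C zad i ([], []) hine]
    rw [hV, hrow]
    simp only [List.nil_append]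
    rw [PySem.List.pyGetD_zero, PySem.List.pyGetD_zero, PySem.List.pyGetD_zero]
    rw [pvGetDSingleton]
    rw [pvTakeSucc _ 0 0 (by omega)]
    rw [show W.getD 0 0 = V.getD 0 0 + row.getD 0 0 from by
      rw [hWdef, pvCompGetDZero V _ hVne htne]
      rw [show (row.take (m-1)).getD 0 0 = row.getD 0 0 from
        pvGetDTake row (m-1) 0 0 (by omega)]]
    simp
  | succ k hk ih =>
    intro hkm
    obtain ⟨S, hSlen, hfold⟩ := ih (by omega)
    set W := pvComp V (row.take (m-1)) with hWdef
    rw [show (((k+1:Nat)) : Int) = (k : Int) + 1 from by push_cast; ring]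
    rw [PySem.List.pyRange_one_succ_right (by positivity)]
    rw [List.foldl_append, hfold]
    simp only [List.foldl_cons, List.foldl_nil]
    rw [pvCalcInnerRowiPos C zad i (S, W.take k) (k:Int) hine (by omega)]
    have hcast1 : ((k:Int) - 1) = ((k - 1 : Nat) : Int) := by omega
    simp only [hcast1, PySem.List.pyGetD_natCast, hV, hrow]
    rw [pvGetDTake _ k (k-1) 0 (by omega)]
    refine ⟨S ++ [max (W.getD (k-1) 0) (V.getD k 0)], by simp [hSlen], ?_⟩
    rw [show (S ++ [max (W.getD (k-1) 0) (V.getD k 0)]).getD k 0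
          = max (W.getD (k-1) 0) (V.getD k 0) from by
      rw [← hSlen]; exact pvGetDAppendLen S _ 0]
    rw [pvTakeSucc W k 0 (by omega)]
    have hval : W.getD k 0 = max (W.getD (k-1) 0) (V.getD k 0) + row.getD k 0 := by
      have hksucc : (k - 1) + 1 = k := by omega
      have hrec := pvCompGetDSucc V (row.take (m-1)) (k-1) (by omega) (by rw [hVlen, htlen])
      rw [hksucc, ← hWdef] at hrec
      rw [hrec]
      rw [show (row.take (m-1)).getD k 0 = row.getD k 0 from
        pvGetDTake row (m-1) k 0 (by omega)]
    rw [hval]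

-- ---- getLast helpers ----
theorem pvGetLastDeq (l : List Int) (h : l ≠ []) : l.getLastD 0 = l.getLast h := by
  rw [List.getLastD_eq_getLast?, List.getLast?_eq_getLast h]
  rfl

theorem pvGetLastEqGetD {α : Type} (l : List α) (h : l ≠ []) (d : α) :
    l.getLast h = l.getD (l.length - 1) d := by
  rw [List.getLast_eq_getElem, List.getD_eq_getElem l d (by
    have := List.length_pos_iff.mpr h
    omega)]

-- ---- the outer loop of calculate_Cmax builds the prefix completion vectors ----
theorem pvOL (z0 : List Int) (zrest : List (List Int)) (m : Nat) (hm2 : 2 ≤ m)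
    (hz0 : z0.length = m) (huni : ∀ r ∈ zrest, r.length = m) :
    ∀ i : Nat, 1 ≤ i → i ≤ (z0 :: zrest).length →
    ∃ S : List (List Int),
      (PySem.List.pyRange 0 (i : Int) 1).foldl (pvCalcOuter (z0 :: zrest))
          ([], [], [0], [PySem.List.pyGetD (PySem.List.pyGetD (z0 :: zrest) 0 []) 0 0])
        = (S, (pvCumsum (z0.take (m-1)) :: pvPrefixes (pvCumsum (z0.take (m-1)))
                 (zrest.map (fun r => r.take (m-1)))).take i, [], []) := by
  set v0 := pvCumsum (z0.take (m-1)) with hv0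
  set trest := zrest.map (fun r => r.take (m-1)) with htrest
  set Plist := v0 :: pvPrefixes v0 trest with hPlist
  have hv0len : v0.length = m - 1 := by
    rw [hv0, pvLenCumsum]; simp [hz0]
  have htrlen : ∀ t ∈ trest, t.length = m - 1 := by
    intro t ht
    rw [htrest] at ht
    obtain ⟨r, hr, hrt⟩ := List.mem_map.mp ht
    rw [← hrt]; simp [huni r hr]
  have hPlen : Plist.length = (z0 :: zrest).length := by
    rw [hPlist]; simp [pvLenPrefixes, htrest]
  intro i hi1
  induction i, hi1 using Nat.le_induction with
  | base =>
    intro _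
    rw [show ((1:Nat) : Int) = 0 + 1 from by omega, PySem.List.pyRange_one_singleton]
    simp only [List.foldl_cons, List.foldl_nil]
    rw [show pvCalcOuter (z0 :: zrest) ([], [], [0],
          [PySem.List.pyGetD (PySem.List.pyGetD (z0 :: zrest) 0 []) 0 0]) 0
        = ([] ++ [((PySem.List.pyRange 0 (((PySem.List.pyGetD (z0 :: zrest) 0 []).length : Int) - 1) 1).foldl
              (pvCalcInner [] (z0 :: zrest) 0) ([0], [PySem.List.pyGetD (PySem.List.pyGetD (z0 :: zrest) 0 []) 0 0])).1],
           [] ++ [((PySem.List.pyRange 0 (((PySem.List.pyGetD (z0 :: zrest) 0 []).length : Int) - 1) 1).foldl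
              (pvCalcInner [] (z0 :: zrest) 0) ([0], [PySem.List.pyGetD (PySem.List.pyGetD (z0 :: zrest) 0 []) 0 0])).2],
           [], []) from rfl]
    have hrow0 : PySem.List.pyGetD (z0 :: zrest) 0 [] = z0 := by
      rw [PySem.List.pyGetD_zero]; rfl
    obtain ⟨S, hSlen, hfold⟩ := pvIL0 [] (z0 :: zrest) z0 m hrow0 hz0 hm2 (m-1) (by omega) (le_refl _)
    rw [show (((PySem.List.pyGetD (z0 :: zrest) 0 []).length : Int) - 1) = ((m - 1 : Nat) : Int) from by
      rw [hrow0, hz0]; omega]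
    rw [hfold]
    refine ⟨[S], ?_⟩
    rw [show (pvCumsum (z0.take (m-1))).take (m-1) = v0 from by
      rw [← hv0]; exact List.take_of_length_le (by rw [hv0len])]
    rw [hPlist]
    simp
  | succ i hi ih =>
    intro him
    obtain ⟨S, hfold⟩ := ih (by omega)
    rw [show (((i+1:Nat)) : Int) = (i : Int) + 1 from by push_cast; ring]
    rw [PySem.List.pyRange_one_succ_right (by positivity)]
    rw [List.foldl_append, hfold]
    simp only [List.foldl_cons, List.foldl_nil]
    -- the i-th row
    have him' : i ≤ zrest.length := by simp at him; omega
    have hirange : i < (z0 :: zrest).length := by simp; omega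
    set rowi := (z0 :: zrest).getD i [] with hrowi
    have hrowi_get : PySem.List.pyGetD (z0 :: zrest) (i : Int) [] = rowi :=
      PySem.List.pyGetD_natCast _ _ _
    have hrowi_mem : rowi ∈ z0 :: zrest := by
      rw [hrowi, List.getD_eq_getElem _ _ hirange]
      exact List.getElem_mem _
    have hrowi_len : rowi.length = m := by
      rcases List.mem_cons.mp hrowi_mem with h | h
      · rw [h, hz0]
      · exact huni _ h
    have hizr : i - 1 < zrest.length := by omega
    have hrowi_tr : rowi.take (m-1) = trest.getD (i-1) [] := by
      rw [htrest, hrowi]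
      rw [List.getD_eq_getElem _ [] hirange,
          List.getD_eq_getElem _ [] (by simpa using hizr), List.getElem_map]
      congr 1
      rw [List.getElem_cons, dif_neg (show ¬ i = 0 by omega)]
    -- the previous completion vector
    set V := ((trest.take (i-1)).foldl pvComp v0) with hVdef
    have hVlen : V.length = m - 1 := by
      rw [hVdef, pvLenFoldlComp _ _ (by
        intro x hx
        rw [hv0len, htrlen x (List.mem_of_mem_take hx)])]
      exact hv0len
    have hCget : PySem.List.pyGetD (Plist.take i) ((i : Int) - 1) [] = V := by
      rw [show ((i:Int) - 1) = ((i - 1 : Nat) : Int) from by omega]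
      rw [PySem.List.pyGetD_natCast]
      rw [pvGetDTake _ i (i-1) [] (by omega)]
      rw [hPlist, pvPrefixesGetD trest v0 (i-1) (by
        simp only [htrest, List.length_map]; omega)]
    obtain ⟨S', hS'len, hfold'⟩ := pvILi (Plist.take i) (z0 :: zrest) (i : Int) (by omega)
      V rowi m hCget hVlen hrowi_get hrowi_len hm2 (m-1) (by omega) (le_refl _)
    rw [show pvCalcOuter (z0 :: zrest) (S, Plist.take i, [], []) (i : Int)
        = (S ++ [((PySem.List.pyRange 0 (((PySem.List.pyGetD (z0 :: zrest) (i:Int) []).length : Int) - 1) 1).foldl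
              (pvCalcInner (Plist.take i) (z0 :: zrest) (i:Int)) ([], [])).1],
           Plist.take i ++ [((PySem.List.pyRange 0 (((PySem.List.pyGetD (z0 :: zrest) (i:Int) []).length : Int) - 1) 1).foldl
              (pvCalcInner (Plist.take i) (z0 :: zrest) (i:Int)) ([], [])).2],
           [], []) from rfl]
    rw [show (((PySem.List.pyGetD (z0 :: zrest) (i:Int) []).length : Int) - 1) = ((m - 1 : Nat) : Int) from by
      rw [hrowi_get, hrowi_len]; omega]
    rw [hfold']
    refine ⟨S ++ [S'], ?_⟩
    rw [show (pvComp V (rowi.take (m-1))).take (m-1) = pvComp V (rowi.take (m-1)) from by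
      refine List.take_of_length_le ?_
      rw [pvLenComp _ _ (by rw [hVlen]; simp [hrowi_len])]
      omega]
    have hPi : Plist.getD i [] = pvComp V (rowi.take (m-1)) := by
      rw [hPlist, pvPrefixesGetD trest v0 i (by
        simp only [htrest, List.length_map]; omega)]
      rw [show trest.take i = trest.take (i-1) ++ [trest.getD (i-1) []] from by
        rw [show i = (i-1) + 1 from by omega]
        exact pvTakeSucc trest (i-1) [] (by simp only [htrest, List.length_map]; omega)]
      rw [List.foldl_append]
      simp only [List.foldl_cons, List.foldl_nil]
      rw [← hVdef, ← hrowi_tr]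
    rw [show Plist.take i ++ [pvComp V (rowi.take (m-1))] = Plist.take (i+1) from by
      rw [← hPi]
      exact (pvTakeSucc Plist i [] (by omega)).symm]

-- ---- calculate_Cmax computes the forward-DP makespan of the times matrix ----
theorem pvA1 (zad : List (List Int)) (m : Nat) (hm2 : 2 ≤ m)
    (hne : zad ≠ []) (huni : ∀ r ∈ zad, r.length = m) :
    pvCalcCmax zad = some (pvCmaxRows (zad.map (fun r => r.take (m-1)))) := by
  obtain ⟨z0, zrest, rfl⟩ : ∃ z0 zrest, zad = z0 :: zrest := by
    cases zad with
    | nil => simp at hne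
    | cons a b => exact ⟨a, b, rfl⟩
  have hz0 : z0.length = m := huni z0 (by simp)
  have huni' : ∀ r ∈ zrest, r.length = m := fun r hr => huni r (List.mem_cons_of_mem _ hr)
  set v0 := pvCumsum (z0.take (m-1)) with hv0
  set trest := zrest.map (fun r => r.take (m-1)) with htrest
  set Plist := v0 :: pvPrefixes v0 trest with hPlist
  have hPlen : Plist.length = (z0 :: zrest).length := by
    rw [hPlist]; simp [pvLenPrefixes, htrest]
  obtain ⟨S, hfold⟩ := pvOL z0 zrest m hm2 hz0 huni' (z0 :: zrest).length (by simp) (le_refl _)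
  rw [show Plist.take (z0 :: zrest).length = Plist from
    List.take_of_length_le (by rw [hPlen])] at hfold
  rw [pvCalcCmax]
  rw [if_neg (by simp)]
  simp only [hfold]
  -- C[-1][-1]
  have hPne : Plist ≠ [] := by rw [hPlist]; simp
  rw [PySem.List.pyGetD_neg_one _ _ hPne]
  have hlast : Plist.getLast hPne = trest.foldl pvComp v0 := by
    rw [pvGetLastEqGetD Plist hPne []]
    rw [hPlist]
    rw [show (v0 :: pvPrefixes v0 trest).length - 1 = trest.length from by
      simp [pvLenPrefixes]]
    rw [pvPrefixesGetD trest v0 trest.length (le_refl _)]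
    rw [List.take_of_length_le (le_refl _)]
  have hlastlen : (Plist.getLast hPne).length = m - 1 := by
    rw [hlast, pvLenFoldlComp _ _ (by
      intro x hx
      rw [hv0, pvLenCumsum]
      simp [hz0]
      rw [htrest] at hx
      obtain ⟨r, hr, hrt⟩ := List.mem_map.mp hx
      rw [← hrt]; simp [huni' r hr])]
    rw [hv0, pvLenCumsum]; simp [hz0]
  have hlastne : Plist.getLast hPne ≠ [] := by
    intro hc; rw [hc] at hlastlen; simp at hlastlen; omega
  rw [PySem.List.pyGetD_neg_one _ _ hlastne]
  rw [show (z0 :: zrest).map (fun r => r.take (m-1)) = z0.take (m-1) :: trest from by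
    rw [htrest]; simp]
  rw [pvCmaxRows]
  rw [← hv0, ← hlast]
  rw [pvGetLastDeq _ hlastne]

-- ---- Cmax after removing job l, expressed through the prefix and tail vectors ----
theorem pvFormula (z0 : List Int) (zrest : List (List Int)) (m : Nat) (hm2 : 2 ≤ m)
    (hz0 : z0.length = m) (huni : ∀ r ∈ zrest, r.length = m) (hzr : zrest ≠ [])
    (l : Nat) (hl : l < (z0 :: zrest).length) :
    pvCmaxRows (((z0 :: zrest).map (fun r => r.take (m-1))).eraseIdx l)
      = (if l = 0
         then ((pvTails ((z0 :: zrest).map (fun r => r.take (m-1)))).getD 1 []).headD 0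
         else if l = (z0 :: zrest).length - 1
         then (((pvCumsum (z0.take (m-1)) :: pvPrefixes (pvCumsum (z0.take (m-1)))
                  (zrest.map (fun r => r.take (m-1)))).getD ((z0 :: zrest).length - 2) []).getLastD 0)
         else pvMaxZip
            ((pvCumsum (z0.take (m-1)) :: pvPrefixes (pvCumsum (z0.take (m-1)))
                (zrest.map (fun r => r.take (m-1)))).getD (l-1) [])
            ((pvTails ((z0 :: zrest).map (fun r => r.take (m-1)))).getD (l+1) [])) := by
  set v0 := pvCumsum (z0.take (m-1)) with hv0
  set trest := zrest.map (fun r => r.take (m-1)) with htrest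
  have htimes : (z0 :: zrest).map (fun r => r.take (m-1)) = z0.take (m-1) :: trest := by
    rw [htrest]; simp
  set n := (z0 :: zrest).length with hn
  have hnlen : n = zrest.length + 1 := by rw [hn]; simp
  have hn2 : 2 ≤ n := by
    rw [hnlen]
    have := List.length_pos_iff.mpr hzr
    omega
  have ht0len : (z0.take (m-1)).length = m - 1 := by simp [hz0]
  have hv0len : v0.length = m - 1 := by rw [hv0, pvLenCumsum]; exact ht0len
  have htrlen : ∀ t ∈ trest, t.length = m - 1 := by
    intro t ht
    obtain ⟨r, hr, hrt⟩ := List.mem_map.mp (htrest ▸ ht)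
    rw [← hrt]; simp [huni r hr]
  have htrlistlen : trest.length = n - 1 := by rw [htrest, hnlen]; simp
  rw [htimes]
  by_cases h0 : l = 0
  · subst h0
    rw [if_pos rfl]
    rw [List.eraseIdx_cons_zero]
    rw [pvCmaxRowsHead trest (m-1) (by
        intro hc; rw [hc] at htrlistlen; simp at htrlistlen; omega) (by omega) htrlen]
    rw [pvTailsGetD _ 1 (by simp; omega)]
    simp
  · rw [if_neg h0]
    have hl1 : 1 ≤ l := by omega
    rw [show l = (l-1) + 1 from by omega, List.eraseIdx_cons_succ]
    by_cases hlast : (l-1) + 1 = n - 1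
    · rw [if_pos hlast]
      have herase : trest.eraseIdx (l-1) = trest.take (n-2) := by
        rw [List.eraseIdx_eq_take_drop_succ]
        rw [show (l-1) + 1 = n - 1 from hlast]
        rw [List.drop_eq_nil_of_le (by omega)]
        rw [show l - 1 = n - 2 from by omega]
        simp
      rw [herase]
      rw [pvCmaxRows]
      rw [pvPrefixesGetD trest v0 (n-2) (by omega)]
    · rw [if_neg hlast]
      have hmid : (l-1) + 1 ≤ n - 2 := by omega
      rw [pvCmaxRows]
      rw [List.eraseIdx_eq_take_drop_succ]
      rw [List.foldl_append]
      simp only [Nat.add_sub_cancel]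
      rw [pvPrefixesGetD trest v0 (l-1) (by omega)]
      set V := (trest.take (l-1)).foldl pvComp v0 with hV
      have hVlen : V.length = m - 1 := by
        rw [hV, pvLenFoldlComp _ _ (by
          intro x hx; rw [hv0len, htrlen x (List.mem_of_mem_take hx)])]
        exact hv0len
      have hdropne : trest.drop ((l-1)+1) ≠ [] := by
        intro hc
        have := congrArg List.length hc
        rw [List.length_drop] at this
        simp at this
        omega
      rw [pvCrossing (trest.drop ((l-1)+1)) V hdropne
            (by intro hc; rw [hc] at hVlen; simp at hVlen; omega)
            (by intro x hx; rw [hVlen]; exact htrlen x (List.mem_of_mem_drop hx))]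
      rw [pvTailsGetD _ ((l-1)+1+1) (by simp; omega)]
      rw [show ((z0.take (m-1)) :: trest).drop ((l-1)+1+1) = trest.drop ((l-1)+1) from by
        rw [List.drop_succ_cons]]

-- ---- one selection step of A equals one selection step of B ----
theorem pvStepAB (z0 : List Int) (zrest : List (List Int)) (nie : Int) (m : Nat)
    (hm : z0.length = m) (hm2 : 2 ≤ m) (huni : ∀ r ∈ zrest, r.length = m) (hzr : zrest ≠ [])
    (l : Nat) (hl : l < (z0 :: zrest).length) (b idx : Int) :
    pvSelStepA (z0 :: zrest) nie (some b, idx) (l : Int)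
      = (some (pvSelStepB (z0 :: zrest)
            (pvCumsum (z0.take (m-1)) :: pvPrefixes (pvCumsum (z0.take (m-1)))
              (zrest.map (fun r => r.take (m-1))))
            (pvTails (z0.take (m-1) :: zrest.map (fun r => r.take (m-1))))
            (z0 :: zrest).length nie (b, idx) l).1,
         (pvSelStepB (z0 :: zrest)
            (pvCumsum (z0.take (m-1)) :: pvPrefixes (pvCumsum (z0.take (m-1)))
              (zrest.map (fun r => r.take (m-1))))
            (pvTails (z0.take (m-1) :: zrest.map (fun r => r.take (m-1))))
            (z0 :: zrest).length nie (b, idx) l).2) := by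
  have hTmap : (z0 :: zrest).map (fun r => r.take (m-1))
      = z0.take (m-1) :: zrest.map (fun r => r.take (m-1)) := by simp
  unfold pvSelStepA pvSelStepB
  rw [PySem.List.pyGetD_natCast (z0 :: zrest) l []]
  by_cases hc : PySem.List.pyGetD ((z0 :: zrest).getD l []) (-1) 0 ≠ nie
  · rw [if_pos hc, if_pos hc]
    have hpop := PySem.List.pop?_natCast (z0 :: zrest) l hl
    rw [hpop]
    simp only []
    have herane : (z0 :: zrest).eraseIdx l ≠ [] := by
      intro hcn
      have h1 := congrArg List.length hcn
      rw [List.length_eraseIdx_of_lt hl] at h1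
      simp only [List.length_cons, List.length_nil] at h1
      have hzl := List.length_pos_iff.mpr hzr
      omega
    have heruni : ∀ r ∈ (z0 :: zrest).eraseIdx l, r.length = m := by
      intro r hr
      have hmem := List.mem_of_mem_eraseIdx hr
      rcases List.mem_cons.mp hmem with h | h
      · rw [h, hm]
      · exact huni r h
    have hcm := pvA1 ((z0 :: zrest).eraseIdx l) m hm2 herane heruni
    rw [show ((z0 :: zrest).eraseIdx l).map (fun r => r.take (m-1))
          = ((z0 :: zrest).map (fun r => r.take (m-1))).eraseIdx l from
        (List.eraseIdx_map _ _ _).symm] at hcm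
    rw [pvFormula z0 zrest m hm2 hm huni hzr l hl] at hcm
    rw [← hTmap]
    rw [hcm]
    by_cases hlt : (if l = 0
        then ((pvTails ((z0 :: zrest).map (fun r => r.take (m-1)))).getD 1 []).headD 0
        else if l = (z0 :: zrest).length - 1
        then (((pvCumsum (z0.take (m-1)) :: pvPrefixes (pvCumsum (z0.take (m-1)))
                 (zrest.map (fun r => r.take (m-1)))).getD ((z0 :: zrest).length - 2) []).getLastD 0)
        else pvMaxZip
           ((pvCumsum (z0.take (m-1)) :: pvPrefixes (pvCumsum (z0.take (m-1)))
               (zrest.map (fun r => r.take (m-1)))).getD (l-1) [])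
           ((pvTails ((z0 :: zrest).map (fun r => r.take (m-1)))).getD (l+1) [])) < b
    · simp only [pvLtInf, hlt, decide_true, if_true]
    · simp only [pvLtInf, hlt, decide_false]
      simp
  · rw [if_neg hc, if_neg hc]

-- ---- the whole selection loop of A equals the selection loop of B ----
theorem pvSelFoldAB (z0 : List Int) (zrest : List (List Int)) (nie : Int) (m : Nat)
    (hm : z0.length = m) (hm2 : 2 ≤ m) (huni : ∀ r ∈ zrest, r.length = m) (hzr : zrest ≠ []) :
    ∀ (ls : List Nat), (∀ x ∈ ls, x < (z0 :: zrest).length) → ∀ (b idx : Int),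
    ls.foldl (fun (st : Option Int × Int) (k : Nat) => pvSelStepA (z0 :: zrest) nie st (k : Int)) (some b, idx)
      = (some ((ls.foldl (pvSelStepB (z0 :: zrest)
            (pvCumsum (z0.take (m-1)) :: pvPrefixes (pvCumsum (z0.take (m-1)))
              (zrest.map (fun r => r.take (m-1))))
            (pvTails (z0.take (m-1) :: zrest.map (fun r => r.take (m-1))))
            (z0 :: zrest).length nie) (b, idx)).1),
         ((ls.foldl (pvSelStepB (z0 :: zrest)
            (pvCumsum (z0.take (m-1)) :: pvPrefixes (pvCumsum (z0.take (m-1)))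
              (zrest.map (fun r => r.take (m-1))))
            (pvTails (z0.take (m-1) :: zrest.map (fun r => r.take (m-1))))
            (z0 :: zrest).length nie) (b, idx)).2)) := by
  intro ls
  induction ls with
  | nil => intro _ b idx; simp
  | cons l ls' ih =>
    intro hmem b idx
    simp only [List.foldl_cons]
    rw [pvStepAB z0 zrest nie m hm hm2 huni hzr l (hmem l (by simp)) b idx]
    rcases hpb : pvSelStepB (z0 :: zrest)
            (pvCumsum (z0.take (m-1)) :: pvPrefixes (pvCumsum (z0.take (m-1)))
              (zrest.map (fun r => r.take (m-1))))
            (pvTails (z0.take (m-1) :: zrest.map (fun r => r.take (m-1))))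
            (z0 :: zrest).length nie (b, idx) l with ⟨b', idx'⟩
    rw [hpb]
    exact ih (fun x hx => hmem x (List.mem_cons_of_mem _ hx)) b' idx'

-- ===== VERDICT (by name: the statement is the Claim_ definition above) =====
theorem selectX4_spec : Claim_equal_selectX4 := by
  intro zad nie _ hpre
  unfold Spec_selectX4
  obtain ⟨hne, huni0, hm1, hdisj⟩ := hpre
  cases zad with
  | nil => exact absurd rfl hne
  | cons r0 rest =>
    simp only [List.headD_cons] at huni0 hm1 hdisj
    by_cases hrest : rest = []
    · subst hrest
      have hstep : pvSelStepA [r0] nie (pvCalcCmax [r0], -1) 0 = (pvCalcCmax [r0], -1) := by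
        unfold pvSelStepA
        split_ifs with h
        · rw [PySem.List.pop?_zero_cons]
          simp [pvCalcCmax, pvLtInf]
        · rfl
      unfold selectX4
      simp only [show ((List.length [r0] : Int)) = 0 + 1 from by simp,
        PySem.List.pyRange_one_singleton, List.foldl_cons, List.foldl_nil, hstep]
      rfl
    · have hzr : rest ≠ [] := hrest
      have hrl : 1 ≤ rest.length := List.length_pos_iff.mpr hzr
      have hm2 : 2 ≤ r0.length := by
        rcases hdisj with h | h
        · exact h
        · simp only [List.length_cons] at h; omega
      have huni' : ∀ r ∈ rest, r.length = r0.length := fun r hr =>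
        huni0 r (List.mem_cons_of_mem _ hr)
      have hbest : pvCalcCmax (r0 :: rest)
          = some (((pvCumsum (r0.take (r0.length - 1)) :: pvPrefixes (pvCumsum (r0.take (r0.length - 1)))
                (rest.map (fun r => r.take (r0.length - 1)))).getD ((r0 :: rest).length - 1) []).getLastD 0) := by
        rw [pvA1 (r0 :: rest) r0.length hm2 (by simp) (by
          intro r hr
          rcases List.mem_cons.mp hr with h | h
          · rw [h]
          · exact huni' r h)]
        congr 1
        rw [show (r0 :: rest).map (fun r => r.take (r0.length - 1))
              = r0.take (r0.length - 1) :: rest.map (fun r => r.take (r0.length - 1)) from by simp]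
        rw [pvCmaxRows]
        rw [pvPrefixesGetD _ _ ((r0 :: rest).length - 1) (by simp)]
        rw [show (rest.map (fun r => r.take (r0.length - 1))).take ((r0 :: rest).length - 1)
              = rest.map (fun r => r.take (r0.length - 1)) from List.take_of_length_le (by simp)]
      unfold selectX4
      simp only [PySem.List.pyRange_zero_natCast, List.foldl_map, hbest]
      rw [pvSelFoldAB r0 rest nie r0.length rfl hm2 huni' hzr
        (List.range (r0 :: rest).length) (fun x hx => List.mem_range.mp hx) _ (-1)]
      have hB : selectX4_alt (r0 :: rest) nie
          = PySem.List.pyGetD (r0 :: rest)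
              (((List.range (r0 :: rest).length).foldl
                (pvSelStepB (r0 :: rest)
                  (pvCumsum (r0.take (r0.length - 1)) :: pvPrefixes (pvCumsum (r0.take (r0.length - 1)))
                    (rest.map (fun r => r.take (r0.length - 1))))
                  (pvTails (r0.take (r0.length - 1) :: rest.map (fun r => r.take (r0.length - 1))))
                  (r0 :: rest).length nie)
                ((((pvCumsum (r0.take (r0.length - 1)) :: pvPrefixes (pvCumsum (r0.take (r0.length - 1)))
                    (rest.map (fun r => r.take (r0.length - 1)))).getD ((r0 :: rest).length - 1) []).getLastD 0), -1)).2) [] := by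
        simp only [selectX4_alt]
        rw [if_neg (by simp only [List.length_cons]; omega)]
      rw [hB]
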